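-- pv_equiv track=rewrite | github.com/yseeker/Atcoder | Python_Solutions/nikkei2019_2_qual_b.py | counting_tree
-- ===== SOURCE A (Python) =====
-- def counting_tree(N, D):
--     #import collections
--     tot = 1
--
--     #cnt = collections.Counter(D)
--
--     cnt = [0]*N
--     for i in D:
--         cnt[i]+=1
--
--     for i in D[1:]:
--         tot = tot * cnt[i-1]%998244353
--
--     return tot if D[0]==0 else 0
-- ===== SOURCE B (Python) =====
-- def counting_tree(N, D):
--     MOD = 998244353
--     cnt = [0] * N
--     for d in D:
--         cnt[d] += 1
--     if D[0] != 0: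
--         return 0
--     freq = {}
--     for d in D[1:]:
--         freq[d] = freq.get(d, 0) + 1
--     tot = 1
--     for v, m in freq.items():
--         tot = tot * pow(cnt[v - 1], m, MOD) % MOD
--     return tot
-- ===== Notes on version B (the rewrite author's own statement) =====
-- stated objective: alternative
-- what changed: B returns 0 immediately when D[0] != 0 and replaces A's per-node modular multiply over D[1:] by a frequency dict over the distinct distances with one grouped modular exponentiation pow(cnt[v-1], m, MOD) per distinct value.
import Mathlib
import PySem

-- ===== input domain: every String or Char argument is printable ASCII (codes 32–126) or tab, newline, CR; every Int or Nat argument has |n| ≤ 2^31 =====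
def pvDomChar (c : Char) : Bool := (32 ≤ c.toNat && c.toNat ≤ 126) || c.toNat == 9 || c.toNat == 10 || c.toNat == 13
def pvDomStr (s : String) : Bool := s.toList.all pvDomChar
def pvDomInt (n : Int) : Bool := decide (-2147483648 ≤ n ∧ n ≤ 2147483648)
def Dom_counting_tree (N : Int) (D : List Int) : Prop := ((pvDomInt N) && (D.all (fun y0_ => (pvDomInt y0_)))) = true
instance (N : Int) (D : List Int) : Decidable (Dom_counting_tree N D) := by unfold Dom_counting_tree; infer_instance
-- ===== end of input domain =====

-- B groups the per-node multiplications of A into one modular exponentiation per distinct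
-- distance via a frequency dict, and returns 0 early when D[0] != 0 (objective: alternative).

-- ===== PORT A =====
-- '[0]*N': Python yields [] for N ≤ 0; List.replicate N.toNat 0 matches exactly.
def counting_tree (N : Int) (D : List Int) : Int :=
  let tot : Int := 1
  let cnt : List Int := List.replicate N.toNat 0
  let cnt := D.foldl (fun c i => PySem.List.pySetD c i (PySem.List.pyGetD c i 0 + 1)) cnt
  let tot := (PySem.List.slice D (some 1) none).foldl
      (fun t i => PySem.Int.mod (t * PySem.List.pyGetD cnt (i - 1) 0) 998244353) tot
  if PySem.List.pyGetD D 0 0 == 0 then tot else 0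

-- ===== PORT B =====
-- 'pow(b, m, MOD)' for m ≥ 0 is exactly PySem.Int.mod (b ^ m.toNat) MOD.
def counting_tree_alt (N : Int) (D : List Int) : Int :=
  let MOD : Int := 998244353
  let cnt : List Int := List.replicate N.toNat 0
  let cnt := D.foldl (fun c d => PySem.List.pySetD c d (PySem.List.pyGetD c d 0 + 1)) cnt
  if PySem.List.pyGetD D 0 0 != 0 then 0
  else
    let freq := (PySem.List.slice D (some 1) none).foldl
        (fun f d => f.insert d (f.getD d 0 + 1)) (PySem.Dict.empty : PySem.Dict Int Int)
    freq.items.foldl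
      (fun t vm => PySem.Int.mod (t * PySem.Int.mod (PySem.List.pyGetD cnt (vm.1 - 1) 0 ^ vm.2.toNat) MOD) MOD) 1

-- ===== PRECONDITION & SPEC =====
-- exactly the inputs on which A returns: D nonempty (D[0]), every distance a valid
-- (possibly negative) index into the length-max(N,0) list cnt, and for non-root
-- entries i also i-1 a valid index (cnt[i-1]).
def Pre_counting_tree (N : Int) (D : List Int) : Prop :=
  D ≠ [] ∧ (∀ i ∈ D, PySem.Raise.InRange N.toNat i) ∧
    (∀ i ∈ D.tail, PySem.Raise.InRange N.toNat (i - 1))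
instance (N : Int) (D : List Int) : Decidable (Pre_counting_tree N D) := by
  unfold Pre_counting_tree; infer_instance
def pvWitness_counting_tree : Int × List Int := (2, [0, 1])
def Spec_counting_tree (N : Int) (D : List Int) (out : Int) : Prop := out = counting_tree_alt N D
instance (N : Int) (D : List Int) (out : Int) : Decidable (Spec_counting_tree N D out) := by
  unfold Spec_counting_tree; infer_instance

-- ===== CLAIM (what is proved, stated in full; the proofs are below) =====
def Claim_equal_counting_tree : Prop := ∀ (N : Int) (D : List Int), Dom_counting_tree N D → Pre_counting_tree N D → Spec_counting_tree N D (counting_tree N D)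

-- ===== LEMMAS AND PROOFS =====

theorem pv_modp (a : Int) : PySem.Int.mod a 998244353 = a % 998244353 :=
  PySem.Int.mod_eq_emod_of_pos (by norm_num)

theorem pv_emod_mul_left (x y : Int) :
    ((x % 998244353) * y) % 998244353 = (x * y) % 998244353 := by
  rw [Int.mul_emod, Int.emod_emod_of_dvd _ dvd_rfl, ← Int.mul_emod]

theorem pv_emod_mul_right (x y : Int) :
    (x * (y % 998244353)) % 998244353 = (x * y) % 998244353 := by
  rw [mul_comm, pv_emod_mul_left, mul_comm]

-- fold of (· * g x % p) equals the product mod p (for nonempty lists)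
theorem pv_fold_mod {α : Type} (g : α → Int) :
    ∀ (L : List α) (a : Int), L ≠ [] →
      L.foldl (fun t x => (t * g x) % 998244353) a = (a * (L.map g).prod) % 998244353 := by
  intro L
  induction L with
  | nil => intro a h; exact absurd rfl h
  | cons x xs ih =>
    intro a _
    rcases eq_or_ne xs ([] : List α) with h | h
    · subst h; simp
    · simp only [List.foldl_cons, List.map_cons, List.prod_cons, ih _ h]
      rw [pv_emod_mul_left, mul_assoc]

-- mods inside a product can be dropped under the outer mod
theorem pv_prod_map_mod {α : Type} (g : α → Int) (L : List α) :
    (L.map (fun x => g x % 998244353)).prod % 998244353 = (L.map g).prod % 998244353 := by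
  induction L with
  | nil => rfl
  | cons x xs ih =>
    simp only [List.map_cons, List.prod_cons]
    rw [pv_emod_mul_left, ← pv_emod_mul_right, ih, pv_emod_mul_right]

theorem pv_toFinset_ofList (L : List Int) : (PySem.Set.ofList L).toFinset = L.toFinset := by
  ext x; simp [List.mem_toFinset, PySem.Set.mem_ofList]

-- grouping: the product over distinct values with multiplicities equals the plain product
theorem pv_group_prod (f : Int → Int) (L : List Int) :
    ((PySem.Set.ofList L).map (fun k => f k ^ L.count k)).prod = (L.map f).prod := by
  rw [Finset.prod_list_map_count L f, ← List.prod_toFinset _ (PySem.Set.nodup_ofList L),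
    pv_toFinset_ofList]

theorem pv_counter_items_ne_nil (L : List Int) (h : L ≠ []) :
    (PySem.Dict.counter L).items ≠ [] := by
  intro hitems
  rcases List.exists_cons_of_ne_nil h with ⟨x, xs, rfl⟩
  have h1 : (PySem.Dict.counter (x :: xs)).getD x 0 = (x :: xs).count x :=
    PySem.Dict.getD_counter _ _
  have h2 : (PySem.Dict.counter (x :: xs)) = PySem.Dict.empty := by
    apply PySem.Dict.ext; simpa using hitems
  rw [h2] at h1
  simp [PySem.Dict.getD, PySem.Dict.get?, PySem.Dict.empty, List.count_cons_self] at h1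
  omega

-- ===== VERDICT (by name: the statement is the Claim_ definition above) =====
theorem counting_tree_spec : Claim_equal_counting_tree := by
  intro N D _ hpre
  unfold Spec_counting_tree counting_tree counting_tree_alt
  simp only [pv_modp]
  obtain ⟨hne, _, _⟩ := hpre
  set cnt := D.foldl (fun c i => PySem.List.pySetD c i (PySem.List.pyGetD c i 0 + 1))
      (List.replicate N.toNat (0 : Int)) with hcnt
  set L := PySem.List.slice D (some 1) none with hL
  by_cases h0 : PySem.List.pyGetD D 0 0 = 0
  · simp only [h0, beq_self_eq_true, bne_self_eq_false, if_true, Bool.false_eq_true, if_false]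
    -- B's dict loop is the Counter
    rw [PySem.Dict.foldl_insert_getD_add_one_eq_counter]
    rcases eq_or_ne L ([] : List Int) with hL0 | hL0
    · rw [hL0]; rfl
    · rw [pv_fold_mod (fun i => PySem.List.pyGetD cnt (i - 1) 0) L 1 hL0,
        pv_fold_mod (fun vm : Int × Int => PySem.List.pyGetD cnt (vm.1 - 1) 0 ^ vm.2.toNat % 998244353)
          _ 1 (pv_counter_items_ne_nil L hL0)]
      simp only [one_mul]
      rw [pv_prod_map_mod (fun vm : Int × Int => PySem.List.pyGetD cnt (vm.1 - 1) 0 ^ vm.2.toNat)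
          ((PySem.Dict.counter L).items)]
      rw [PySem.Dict.items_counter, List.map_map]
      rw [← pv_group_prod (fun i => PySem.List.pyGetD cnt (i - 1) 0) L]
      congr 1
  · have : ¬ (PySem.List.pyGetD D 0 0 == 0) = true := by simpa using h0
    simp [this, h0]
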